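-- pv_equiv track=rewrite | github.com/site-chenwei/skills-hub | skills/docs-hub/scripts/_common.py | _segment_by_markdown_ast_from_lines
-- ===== SOURCE A (Python) =====
-- def _segment_by_markdown_ast_from_lines(
--     lines: tuple[str, ...],
--     headings: tuple[tuple[int, str, int, int], ...],
-- ) -> list[tuple[str, str]]:
--     """基于已解析标题生成 (heading_path, segment_text) 列表。
--
--     - 识别 `^\\s{0,3}#{1,6}\\s+title` 形式的 ATX 标题。
--     - 识别 setext 标题：前一行非空文本、下一行由 `=`（H1）或 `-`（H2）组成。
--       这正是 CommonMark 区分 `---` 是 setext 下划线还是 thematic break 的规则。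
--     - 跟踪 ``` / ~~~ fenced code block，围栏内的 `#` 与 `---` 都不作为标题。
--     - 与 commonmark 严格语义相比做了简化：未处理 indented code block (4 空格)、HTML 块内标题、
--       block quote 嵌套 setext 等罕见结构；真实 DocsHub 语料里这些模式不影响主路径。
--     """
--     if not headings:
--         whole = "\n".join(lines).strip()
--         return [("", whole)] if whole else []
--
--     segments: list[tuple[str, str]] = []
--     if headings[0][2] > 0:
--         preface = "\n".join(lines[: headings[0][2]]).strip()
--         if preface:
--             segments.append(("", preface))
--
--     stack: list[tuple[int, str]] = []
--     for idx, (level, title, _start_line, content_start_line) in enumerate(headings):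
--         while stack and stack[-1][0] >= level:
--             stack.pop()
--         stack.append((level, title))
--         next_start_line = headings[idx + 1][2] if idx + 1 < len(headings) else len(lines)
--         seg_text = "\n".join(lines[content_start_line:next_start_line]).strip()
--         if not seg_text:
--             continue
--         heading_path = " > ".join(text for _, text in stack if text)
--         segments.append((heading_path, seg_text))
--     return segments
-- ===== SOURCE B (Python) =====
-- def _segment_by_markdown_ast_from_lines(
--     lines: tuple[str, ...],
--     headings: tuple[tuple[int, str, int, int], ...],
-- ) -> list[tuple[str, str]]:
--     """Stackless variant: each heading's path is the chain of nearest previous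
--     headings with strictly smaller level, found by a backward scan; segment
--     ends are precomputed and zipped instead of looked up by index."""
--     if not headings:
--         whole = "\n".join(lines).strip()
--         return [("", whole)] if whole else []
--
--     segments: list[tuple[str, str]] = []
--     if headings[0][2] > 0:
--         preface = "\n".join(lines[: headings[0][2]]).strip()
--         if preface:
--             segments.append(("", preface))
--
--     ends = [h[2] for h in headings[1:]] + [len(lines)]
--     prev: list[tuple[int, str, int, int]] = []  # headings already seen, in order
--     for (level, title, _start_line, content_start_line), next_start_line in zip(headings, ends):
--         seg_text = "\n".join(lines[content_start_line:next_start_line]).strip()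
--         if seg_text:
--             # chain of nearest previous strictly-smaller-level headings
--             parts = [title] if title else []
--             bound = level
--             for lj, tj, _a, _b in reversed(prev):
--                 if lj < bound:
--                     if tj:
--                         parts.append(tj)
--                     bound = lj
--             segments.append((" > ".join(reversed(parts)), seg_text))
--         prev.append((level, title, _start_line, content_start_line))
--     return segments
-- ===== Notes on version B (the rewrite author's own statement) =====
-- stated objective: alternative
-- what changed: Replaces the incrementally maintained heading stack (pop-while + push per heading) with a stackless per-heading backward scan for the nearest previous strictly-smaller-level chain, and replaces the indexed next-heading lookup with a precomputed ends list zipped against the headings.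
import Mathlib
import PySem

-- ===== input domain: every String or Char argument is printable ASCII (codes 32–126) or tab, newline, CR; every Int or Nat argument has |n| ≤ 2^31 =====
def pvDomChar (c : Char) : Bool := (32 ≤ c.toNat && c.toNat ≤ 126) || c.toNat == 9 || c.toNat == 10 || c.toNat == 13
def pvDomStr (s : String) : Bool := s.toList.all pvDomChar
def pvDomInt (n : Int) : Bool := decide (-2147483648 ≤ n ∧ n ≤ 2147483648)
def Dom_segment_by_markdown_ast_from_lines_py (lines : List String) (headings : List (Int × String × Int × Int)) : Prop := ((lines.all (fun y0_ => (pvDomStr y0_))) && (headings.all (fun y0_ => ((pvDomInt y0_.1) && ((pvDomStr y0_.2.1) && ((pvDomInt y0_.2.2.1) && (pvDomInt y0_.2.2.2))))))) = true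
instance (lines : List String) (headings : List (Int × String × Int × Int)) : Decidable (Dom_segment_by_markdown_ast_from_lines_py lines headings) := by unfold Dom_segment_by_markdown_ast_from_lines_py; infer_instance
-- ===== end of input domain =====

-- B replaces A's incremental heading stack by a per-heading backward nearest-smaller-level
-- chain scan with precomputed segment ends (objective: alternative algorithm, same results).

-- ===== PORT A =====
-- the loop body; Python's stack (append/pop at the right end) is kept top-first: append = cons, the while-pop = dropWhile, and the join runs over stack.reverse
def segA_step (lines : List String) (headings : List (Int × String × Int × Int))
    (st : List (Int × String) × List (String × String)) (ih : Int × (Int × String × Int × Int)) :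
    List (Int × String) × List (String × String) :=
  let idx := ih.1
  let level := ih.2.1
  let title := ih.2.2.1
  let contentStart := ih.2.2.2.2
  let stack := (level, title) :: st.1.dropWhile (fun p => decide (level ≤ p.1))
  let nextStart : Int :=
    if idx + 1 < PySem.List.len headings then
      match PySem.List.pyGet? headings (idx + 1) with
      | some h => h.2.2.1
      | none => 0  -- unreachable: idx + 1 is in range
    else PySem.List.len lines
  let segText := PySem.Str.strip (PySem.Str.join "\n" (PySem.List.slice lines (some contentStart) (some nextStart)))
  if segText = "" then (stack, st.2)
  else
    let headingPath := PySem.Str.join " > " ((stack.reverse.filter (fun p => decide (p.2 ≠ ""))).map (fun p => p.2))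
    (stack, st.2 ++ [(headingPath, segText)])

def segment_by_markdown_ast_from_lines_py (lines : List String) (headings : List (Int × String × Int × Int)) : List (String × String) :=
  if headings = [] then
    let whole := PySem.Str.strip (PySem.Str.join "\n" lines)
    if whole = "" then [] else [("", whole)]
  else
    let segments : List (String × String) :=
      match headings.head? with
      | some h0 =>
        if h0.2.2.1 > 0 then
          let preface := PySem.Str.strip (PySem.Str.join "\n" (PySem.List.slice lines none (some h0.2.2.1)))
          if preface = "" then [] else [("", preface)]
        else []
      | none => []
    ((PySem.List.enumerate headings).foldl (segA_step lines headings) ([], segments)).2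

-- ===== PORT B =====
-- the inner 'for … in reversed(prev)' loop: prev is carried already reversed (top-first)
def segB_parts : List (Int × String × Int × Int) → Int → List String → List String
  | [], _, parts => parts
  | h :: r, bound, parts =>
    if h.1 < bound then
      segB_parts r h.1 (if h.2.1 = "" then parts else parts ++ [h.2.1])
    else segB_parts r bound parts

def segB_go (lines : List String) :
    List (Int × String × Int × Int) → List ((Int × String × Int × Int) × Int) → List (String × String) → List (String × String)
  | _, [], segments => segments
  | prevRev, (h, nextStart) :: rest, segments =>
    let segText := PySem.Str.strip (PySem.Str.join "\n" (PySem.List.slice lines (some h.2.2.2) (some nextStart)))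
    let segments :=
      if segText = "" then segments
      else
        let parts := segB_parts prevRev h.1 (if h.2.1 = "" then [] else [h.2.1])
        segments ++ [(PySem.Str.join " > " parts.reverse, segText)]
    segB_go lines (h :: prevRev) rest segments

def segment_by_markdown_ast_from_lines_py_alt (lines : List String) (headings : List (Int × String × Int × Int)) : List (String × String) :=
  if headings = [] then
    let whole := PySem.Str.strip (PySem.Str.join "\n" lines)
    if whole = "" then [] else [("", whole)]
  else
    let segments : List (String × String) :=
      match headings.head? with
      | some h0 =>
        if h0.2.2.1 > 0 then
          let preface := PySem.Str.strip (PySem.Str.join "\n" (PySem.List.slice lines none (some h0.2.2.1)))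
          if preface = "" then [] else [("", preface)]
        else []
      | none => []
    let ends := (headings.drop 1).map (fun h => h.2.2.1) ++ [PySem.List.len lines]
    segB_go lines [] (headings.zip ends) segments

-- ===== PRECONDITION & SPEC =====
def Spec_segment_by_markdown_ast_from_lines_py (lines : List String) (headings : List (Int × String × Int × Int)) (out : List (String × String)) : Prop := out = segment_by_markdown_ast_from_lines_py_alt lines headings
instance (lines : List String) (headings : List (Int × String × Int × Int)) (out : List (String × String)) : Decidable (Spec_segment_by_markdown_ast_from_lines_py lines headings out) := by unfold Spec_segment_by_markdown_ast_from_lines_py; infer_instance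

-- ===== CLAIM (what is proved, stated in full; the proofs are below) =====
def Claim_equal_segment_by_markdown_ast_from_lines_py : Prop := ∀ (lines : List String) (headings : List (Int × String × Int × Int)), Dom_segment_by_markdown_ast_from_lines_py lines headings → Spec_segment_by_markdown_ast_from_lines_py lines headings (segment_by_markdown_ast_from_lines_py lines headings)

-- ===== LEMMAS AND PROOFS =====

-- the current ancestor chain, read off the reversed prefix with an optional upper bound
def bless (l : Int) : Option Int → Bool
  | none => true
  | some b => decide (l < b)

def chainO : List (Int × String × Int × Int) → Option Int → List (Int × String)
  | [], _ => []
  | h :: r, b => if bless h.1 b then (h.1, h.2.1) :: chainO r (some h.1) else chainO r b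

def stackOf (pre : List (Int × String × Int × Int)) : List (Int × String) :=
  pre.foldl (fun s h => (h.1, h.2.1) :: s.dropWhile (fun p => decide (h.1 ≤ p.1))) []

theorem dropWhile_chainO (l : Int) :
    ∀ (rev : List (Int × String × Int × Int)) (b : Option Int),
      (∀ b', b = some b' → l ≤ b') →
      (chainO rev b).dropWhile (fun p => decide (l ≤ p.1)) = chainO rev (some l) := by
  intro rev
  induction rev with
  | nil => intro b _; simp [chainO]
  | cons h r ih =>
    intro b hb
    by_cases hacc : bless h.1 b = true
    · by_cases hl : l ≤ h.1
      · have : bless h.1 (some l) = false := by simp [bless]; omega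
        simp [chainO, hacc, this, hl]
        exact ih (some h.1) (by intro b' e; cases e; exact hl)
      · have : bless h.1 (some l) = true := by simp [bless]; omega
        simp [chainO, hacc, this, hl]
    · have hb' : ∃ b', b = some b' ∧ ¬ h.1 < b' := by
        cases b with
        | none => simp [bless] at hacc
        | some b' => exact ⟨b', rfl, by simpa [bless] using hacc⟩
      obtain ⟨b', rfl, hge⟩ := hb'
      have hlb : l ≤ b' := hb b' rfl
      have : bless h.1 (some l) = false := by simp [bless]; omega
      simp [chainO, hacc, this]
      exact ih (some b') hb

theorem stackOf_snoc (pre : List (Int × String × Int × Int)) (h : Int × String × Int × Int) :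
    stackOf (pre ++ [h]) = (h.1, h.2.1) :: (stackOf pre).dropWhile (fun p => decide (h.1 ≤ p.1)) := by
  simp [stackOf, List.foldl_append]

theorem stackOf_eq_chainO : ∀ (pre : List (Int × String × Int × Int)),
    stackOf pre = chainO pre.reverse none := by
  intro pre
  induction pre using List.reverseRecOn with
  | nil => simp [stackOf, chainO]
  | append_singleton pre h ih =>
    rw [stackOf_snoc, ih, dropWhile_chainO h.1 pre.reverse none (by intro _ e; cases e)]
    simp [chainO, bless]

theorem segB_parts_eq : ∀ (rev : List (Int × String × Int × Int)) (b : Int) (parts : List String),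
    segB_parts rev b parts
      = parts ++ ((chainO rev (some b)).filter (fun p => decide (p.2 ≠ ""))).map (fun p => p.2) := by
  intro rev
  induction rev with
  | nil => intro b parts; simp [segB_parts, chainO]
  | cons h r ih =>
    intro b parts
    by_cases hl : h.1 < b
    · have hb : bless h.1 (some b) = true := by simp [bless, hl]
      by_cases ht : h.2.1 = ""
      · simp [segB_parts, chainO, hl, hb, ht, ih]
      · simp [segB_parts, chainO, hl, hb, ht, ih]
    · have hb : bless h.1 (some b) = false := by simp [bless]; omega
      simp [segB_parts, chainO, hl, hb, ih]

-- the two heading-path computations agree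
theorem path_eq (pre : List (Int × String × Int × Int)) (h : Int × String × Int × Int) :
    ((stackOf (pre ++ [h])).reverse.filter (fun p => decide (p.2 ≠ ""))).map (fun p => p.2)
      = (segB_parts pre.reverse h.1 (if h.2.1 = "" then [] else [h.2.1])).reverse := by
  rw [stackOf_snoc, stackOf_eq_chainO, dropWhile_chainO h.1 pre.reverse none (by intro _ e; cases e),
      segB_parts_eq]
  by_cases ht : h.2.1 = "" <;>
    simp [ht, List.filter_reverse, List.map_reverse]

-- main loop correspondence: A's enumerate-fold with the live stack versus
-- B's zip-recursion that rescans the already-seen prefix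
theorem loop_eq (lines : List String) (headings : List (Int × String × Int × Int)) :
    ∀ (rest pre : List (Int × String × Int × Int)) (segs : List (String × String)),
      headings = pre ++ rest →
      ((PySem.List.enumerate rest (pre.length : Int)).foldl (segA_step lines headings) (stackOf pre, segs)).2
        = segB_go lines pre.reverse (rest.zip ((rest.drop 1).map (fun h => h.2.2.1) ++ [PySem.List.len lines])) segs := by
  intro rest
  induction rest with
  | nil => intro pre segs _; simp [PySem.List.enumerate_nil, segB_go]
  | cons h rest' ih =>
    intro pre segs hsplit
    rw [PySem.List.enumerate_cons]
    simp only [List.foldl_cons]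
    cases rest' with
    | nil =>
      have hcond : ¬ ((pre.length : Int) + 1 < PySem.List.len headings) := by
        simp [hsplit, PySem.List.len_eq]
      have hA : segA_step lines headings (stackOf pre, segs) ((pre.length : Int), h)
          = (stackOf (pre ++ [h]),
              if PySem.Str.strip (PySem.Str.join "\n"
                  (PySem.List.slice lines (some h.2.2.2) (some (PySem.List.len lines)))) = "" then segs
              else segs ++ [(PySem.Str.join " > "
                (segB_parts pre.reverse h.1 (if h.2.1 = "" then [] else [h.2.1])).reverse,
                PySem.Str.strip (PySem.Str.join "\n"
                  (PySem.List.slice lines (some h.2.2.2) (some (PySem.List.len lines)))))]) := by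
        simp only [segA_step]
        rw [if_neg hcond, stackOf_snoc]
        by_cases hs : PySem.Str.strip (PySem.Str.join "\n"
            (PySem.List.slice lines (some h.2.2.2) (some (PySem.List.len lines)))) = ""
        · rw [if_pos hs, if_pos hs]
        · rw [if_neg hs, if_neg hs, ← stackOf_snoc, path_eq pre h]
      rw [hA]
      simp only [PySem.List.enumerate_nil, List.foldl_nil, List.drop_succ_cons, List.drop_nil,
        List.map_nil, List.nil_append, List.zip_cons_cons, List.zip_nil_right, segB_go]
    | cons h' r'' =>
      have hlt : (pre.length : Int) + 1 < PySem.List.len headings := by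
        simp only [hsplit, PySem.List.len_eq, List.length_append, List.length_cons]
        push_cast
        omega
      have hget : PySem.List.pyGet? headings ((pre.length : Int) + 1) = some h' := by
        rw [hsplit]
        have := PySem.List.pyGet?_append_right pre (h :: h' :: r'') 1
        simpa using this
      have hA : segA_step lines headings (stackOf pre, segs) ((pre.length : Int), h)
          = (stackOf (pre ++ [h]),
              if PySem.Str.strip (PySem.Str.join "\n"
                  (PySem.List.slice lines (some h.2.2.2) (some h'.2.2.1))) = "" then segs
              else segs ++ [(PySem.Str.join " > "
                (segB_parts pre.reverse h.1 (if h.2.1 = "" then [] else [h.2.1])).reverse,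
                PySem.Str.strip (PySem.Str.join "\n"
                  (PySem.List.slice lines (some h.2.2.2) (some h'.2.2.1))))]) := by
        simp only [segA_step]
        rw [if_pos hlt, hget]
        rw [stackOf_snoc]
        by_cases hs : PySem.Str.strip (PySem.Str.join "\n"
            (PySem.List.slice lines (some h.2.2.2) (some h'.2.2.1))) = ""
        · rw [if_pos hs, if_pos hs]
        · rw [if_neg hs, if_neg hs, ← stackOf_snoc, path_eq pre h]
      rw [hA]
      simp only [List.drop_succ_cons, List.drop_zero, List.map_cons, List.cons_append,
        List.zip_cons_cons, segB_go]
      have hcast : ((pre.length : Int) + 1) = (((pre ++ [h]).length : Nat) : Int) := by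
        simp
      rw [hcast]
      have hrec := ih (pre ++ [h])
        (if PySem.Str.strip (PySem.Str.join "\n"
            (PySem.List.slice lines (some h.2.2.2) (some h'.2.2.1))) = "" then segs
          else segs ++ [(PySem.Str.join " > "
            (segB_parts pre.reverse h.1 (if h.2.1 = "" then [] else [h.2.1])).reverse,
            PySem.Str.strip (PySem.Str.join "\n"
              (PySem.List.slice lines (some h.2.2.2) (some h'.2.2.1))))])
        (by simpa using hsplit)
      simp only [List.drop_succ_cons, List.drop_zero] at hrec
      rw [hrec]
      simp

-- ===== VERDICT (by name: the statement is the Claim_ definition above) =====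
theorem segment_by_markdown_ast_from_lines_py_spec : Claim_equal_segment_by_markdown_ast_from_lines_py := by
  intro lines headings _
  unfold Spec_segment_by_markdown_ast_from_lines_py
  by_cases hempty : headings = []
  · simp [hempty, segment_by_markdown_ast_from_lines_py, segment_by_markdown_ast_from_lines_py_alt]
  · have key : ∀ segs : List (String × String),
        ((PySem.List.enumerate headings).foldl (segA_step lines headings) ([], segs)).2
          = segB_go lines []
              (headings.zip ((headings.drop 1).map (fun h => h.2.2.1) ++ [PySem.List.len lines])) segs := by
      intro segs
      have := loop_eq lines headings headings [] segs rfl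
      simpa [stackOf] using this
    unfold segment_by_markdown_ast_from_lines_py segment_by_markdown_ast_from_lines_py_alt
    rw [if_neg hempty, if_neg hempty]
    exact key _
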